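-- pv_equiv track=rewrite | github.com/brianjmaher/Markov-Text | Markov-Text/sentence_generator.py | get_word_weights
-- ===== SOURCE A (Python) =====
-- def get_word_weights(sentences):
--     weights = {}
--     for sentence in sentences:
--         words = sentence.split(" ")
--         # if the sentence is longer than two words, i.e., is more than
--         # just a begin and end tag
--         if len(words) > 2:
--             prev_word = "<begin>"
--             for i in range(1, len(words)):
--                 # manipulate the word as lowercase and stripped
--                 word = words[i].lower().strip()
--                 # if the word isn't an empty string, increment the weights dict
--                 if word != "":
--                     if prev_word not in weights:
--                         weights[prev_word] = {}
--                     if word not in weights[prev_word]: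
--                         weights[prev_word][word] = 0
--                     weights[prev_word][word] += 1
--                     prev_word = word
--     return weights
-- ===== SOURCE B (Python) =====
-- def get_word_weights(sentences):
--     # Stage 1: collect every word-transition pair across all sentences in one flat list.
--     pairs = []
--     for sentence in sentences:
--         words = sentence.split(" ")
--         if len(words) > 2:
--             tokens = ["<begin>"]
--             for w in words[1:]:
--                 t = w.lower().strip()
--                 if t:
--                     tokens.append(t)
--             pairs += list(zip(tokens, tokens[1:]))
--     # Stage 2: group successor words by predecessor in a flat dict of lists.
--     groups = {}
--     for a, b in pairs:
--         groups.setdefault(a, []).append(b)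
--     # Stage 3: count each predecessor's successor list into its weight dict.
--     weights = {}
--     for a, bs in groups.items():
--         node = {}
--         for b in bs:
--             node[b] = node.get(b, 0) + 1
--         weights[a] = node
--     return weights
-- ===== Notes on version B (the rewrite author's own statement) =====
-- stated objective: alternative
-- what changed: Replaces A's single pass that mutates a nested dict with stateful prev_word threading by a three-stage pipeline over a different data structure: collect all transition pairs into one flat list, group successors by predecessor in a flat dict of lists, then count each group's list into its weight dict.
import Mathlib
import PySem

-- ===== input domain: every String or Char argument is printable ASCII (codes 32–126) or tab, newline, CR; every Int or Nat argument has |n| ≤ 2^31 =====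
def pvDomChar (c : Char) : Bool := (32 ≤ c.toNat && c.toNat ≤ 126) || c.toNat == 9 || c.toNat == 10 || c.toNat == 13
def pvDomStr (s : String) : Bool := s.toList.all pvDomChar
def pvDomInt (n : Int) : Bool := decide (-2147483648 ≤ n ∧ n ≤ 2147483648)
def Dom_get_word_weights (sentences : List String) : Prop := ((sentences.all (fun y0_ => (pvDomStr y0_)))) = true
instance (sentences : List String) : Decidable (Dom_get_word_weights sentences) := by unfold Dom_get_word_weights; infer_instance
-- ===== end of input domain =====

-- B replaces A's single stateful pass over a nested dict by a three-stage pipeline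
-- (flat pair list -> dict of successor lists -> count each list); objective: alternative, same cost.

-- ===== PORT A =====
-- word = words[i].lower().strip()
def pvClean (w : String) : String := PySem.Str.strip (PySem.Str.lower w)

-- the body of A's inner loop, state = (weights, prev_word)
def pvStepA (acc : PySem.Dict String (PySem.Dict String Int) × String) (w : String) :
    PySem.Dict String (PySem.Dict String Int) × String :=
  let word := pvClean w
  if word = "" then acc
  else
    let weights := acc.1
    let prev := acc.2
    let weights := if weights.contains prev then weights else weights.insert prev PySem.Dict.empty
    let node := weights.getD prev PySem.Dict.empty
    let node := if node.contains word then node else node.insert word 0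
    let node := node.insert word (node.getD word 0 + 1)
    (weights.insert prev node, word)

-- the body of A's outer for-loop over sentences
def pvBodyA (weights : PySem.Dict String (PySem.Dict String Int)) (sentence : String) :
    PySem.Dict String (PySem.Dict String Int) :=
  let words := (PySem.Str.split? sentence " ").getD []   -- sep " " ≠ "": split? never none
  if 2 < words.length then
    ((PySem.List.pyRange 1 (PySem.List.len words)).foldl
      (fun acc i => pvStepA acc (PySem.List.pyGetD words i "")) (weights, "<begin>")).1
  else weights

def get_word_weights (sentences : List String) : List (String × List (String × Int)) :=
  (sentences.foldl pvBodyA PySem.Dict.empty).items.map (fun p => (p.1, p.2.items))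

-- ===== PORT B =====
-- stage 1 per sentence: the cleaned-token bigram pairs of one sentence
def pvPairsB (sentence : String) : List (String × String) :=
  let words := (PySem.Str.split? sentence " ").getD []   -- sep " " ≠ "": split? never none
  if 2 < words.length then
    let tokens := "<begin>" :: (words.drop 1).foldl (fun acc w =>
      let t := PySem.Str.strip (PySem.Str.lower w)
      if t = "" then acc else acc ++ [t]) []
    tokens.zip tokens.tail
  else []

-- stage 2 body: groups.setdefault(a, []).append(b) mutates the stored list = modify with append
def pvGroupStep (d : PySem.Dict String (List String)) (p : String × String) :
    PySem.Dict String (List String) :=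
  d.modify p.1 [] (fun l => l ++ [p.2])

-- stage 3 inner loop: node[b] = node.get(b, 0) + 1 over one successor list
def pvCountList (bs : List String) : PySem.Dict String Int :=
  bs.foldl (fun n b => n.insert b (n.getD b 0 + 1)) PySem.Dict.empty

def get_word_weights_alt (sentences : List String) : List (String × List (String × Int)) :=
  let pairs := sentences.foldl (fun acc s => acc ++ pvPairsB s) []
  let groups := pairs.foldl pvGroupStep PySem.Dict.empty
  let weights := groups.items.foldl
    (fun w q => w.insert q.1 (pvCountList q.2)) PySem.Dict.empty
  weights.items.map (fun p => (p.1, p.2.items))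

-- ===== PRECONDITION & SPEC =====
def Spec_get_word_weights (sentences : List String) (out : List (String × List (String × Int))) : Prop := out = get_word_weights_alt sentences
instance (sentences : List String) (out : List (String × List (String × Int))) : Decidable (Spec_get_word_weights sentences out) := by unfold Spec_get_word_weights; infer_instance

-- ===== CLAIM (what is proved, stated in full; the proofs are below) =====
def Claim_equal_get_word_weights : Prop := ∀ (sentences : List String), Dom_get_word_weights sentences → Spec_get_word_weights sentences (get_word_weights sentences)

-- ===== LEMMAS AND PROOFS =====

-- A's one-pair update, written in single-insert form
def pvPairStep (w : PySem.Dict String (PySem.Dict String Int)) (p : String × String) :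
    PySem.Dict String (PySem.Dict String Int) :=
  w.insert p.1
    ((w.getD p.1 PySem.Dict.empty).insert p.2 ((w.getD p.1 PySem.Dict.empty).getD p.2 0 + 1))

-- cleaned, non-empty tokens of a word list
def pvTokens (ws : List String) : List String :=
  ws.filterMap (fun w => let t := pvClean w; if t = "" then none else some t)

-- A's one-word update, on a non-empty cleaned word, is exactly one pair update
lemma stepA_eq (d : PySem.Dict String (PySem.Dict String Int)) (prev w : String)
    (h : pvClean w ≠ "") :
    pvStepA (d, prev) w = (pvPairStep d (prev, pvClean w), pvClean w) := by
  simp only [pvStepA, pvPairStep, if_neg h]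
  cases hc : d.contains prev with
  | true =>
    simp only [if_true]
    cases hn : (d.getD prev PySem.Dict.empty).contains (pvClean w) with
    | true => simp
    | false =>
      simp [PySem.Dict.getD_insert_self, PySem.Dict.insert_insert_self,
        PySem.Dict.getD_of_not_contains _ _ hn]
  | false =>
    cases hn : ((d.insert prev PySem.Dict.empty).getD prev PySem.Dict.empty).contains (pvClean w) with
    | true => simp [PySem.Dict.getD_insert_self] at hn ⊢
    | false =>
      simp [PySem.Dict.getD_insert_self, PySem.Dict.getD_empty,
        PySem.Dict.insert_insert_self, PySem.Dict.getD_of_not_contains _ _ hc]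

-- A's inner stateful loop = a fold of pair updates over the bigram pairs of prev :: tokens
lemma inner_eq (ws : List String) :
    ∀ (d : PySem.Dict String (PySem.Dict String Int)) (prev : String),
    ws.foldl pvStepA (d, prev) =
      (((prev :: pvTokens ws).zip (pvTokens ws)).foldl pvPairStep d,
       (pvTokens ws).getLastD prev) := by
  induction ws with
  | nil => intro d prev; simp [pvTokens]
  | cons w ws ih =>
    intro d prev
    by_cases h : pvClean w = ""
    · have ht : pvTokens (w :: ws) = pvTokens ws := by simp [pvTokens, h]
      have hs : pvStepA (d, prev) w = (d, prev) := by simp [pvStepA, h]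
      simp only [List.foldl_cons, hs, ht, ih]
    · have ht : pvTokens (w :: ws) = pvClean w :: pvTokens ws := by
        simp only [pvTokens, List.filterMap_cons]; simp [h]
      simp only [List.foldl_cons, stepA_eq d prev w h, ht, ih, List.zip_cons_cons,
        List.foldl_cons, List.getLastD_cons]

-- B's append-style token loop builds exactly pvTokens
lemma tokensB_eq (ws : List String) : ∀ (acc : List String),
    ws.foldl (fun acc w => if pvClean w = "" then acc else acc ++ [pvClean w]) acc =
      acc ++ pvTokens ws := by
  induction ws with
  | nil => intro acc; simp [pvTokens]
  | cons w ws ih =>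
    intro acc
    by_cases h : pvClean w = ""
    · have ht : pvTokens (w :: ws) = pvTokens ws := by simp [pvTokens, h]
      simp only [List.foldl_cons, if_pos h, ht, ih]
    · have ht : pvTokens (w :: ws) = pvClean w :: pvTokens ws := by
        simp only [pvTokens, List.filterMap_cons]; simp [h]
      simp only [List.foldl_cons, if_neg h, ht, ih, List.append_assoc, List.cons_append,
        List.nil_append]

-- A's per-sentence body = a fold of pair updates over B's pair list of that sentence
lemma body_pairs (weights : PySem.Dict String (PySem.Dict String Int)) (sentence : String) :
    pvBodyA weights sentence = (pvPairsB sentence).foldl pvPairStep weights := by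
  unfold pvBodyA pvPairsB
  set words := (PySem.Str.split? sentence " ").getD [] with hw
  by_cases h : 2 < words.length
  · simp only [if_pos h]
    rw [PySem.List.foldl_pyRange_pyGetD words "" pvStepA (weights, "<begin>") (by norm_num)]
    rw [inner_eq]
    rw [show (fun (acc : List String) (w : String) =>
        let t := PySem.Str.strip (PySem.Str.lower w)
        if t = "" then acc else acc ++ [t]) =
      (fun acc w => if pvClean w = "" then acc else acc ++ [pvClean w]) from rfl]
    rw [tokensB_eq]
    simp [pvTokens, pvClean]
  · simp [if_neg h]

-- A's whole loop = one fold of pair updates over the concatenated pair list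
lemma foldA_eq_pairs (sentences : List String) :
    sentences.foldl pvBodyA PySem.Dict.empty =
      (sentences.foldl (fun acc s => acc ++ pvPairsB s) []).foldl pvPairStep PySem.Dict.empty := by
  rw [PySem.List.foldl_append_eq_flatMap, List.nil_append]
  induction sentences using List.reverseRecOn with
  | nil => rfl
  | append_singleton l s ih =>
    simp only [List.foldl_append, List.foldl_cons, List.foldl_nil, List.flatMap_append,
      List.flatMap_cons, List.flatMap_nil, List.append_nil, body_pairs, ih]

-- the successor list of key a collected from a pair list
def pvSel (ps : List (String × String)) (a : String) : List String :=
  (ps.filter (fun q => q.1 == a)).map (fun q => q.2)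

-- value of A's fold at key a = counting fold of the selected successors
lemma foldPair_getD (ps : List (String × String)) (a : String) :
    (ps.foldl pvPairStep PySem.Dict.empty).getD a PySem.Dict.empty =
      pvCountList (pvSel ps a) := by
  induction ps using List.reverseRecOn with
  | nil => simp [pvSel, pvCountList, PySem.Dict.getD_empty]
  | append_singleton l p ih =>
    simp only [List.foldl_append, List.foldl_cons, List.foldl_nil]
    by_cases hpa : a = p.1
    · subst hpa
      simp only [pvPairStep, PySem.Dict.getD_insert_self, ih]
      simp [pvSel, pvCountList, List.filter_append, List.foldl_append]
    · have : (pvPairStep (l.foldl pvPairStep PySem.Dict.empty) p).getD a PySem.Dict.empty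
          = (l.foldl pvPairStep PySem.Dict.empty).getD a PySem.Dict.empty := by
        simp [pvPairStep, PySem.Dict.getD_insert, hpa]
      rw [this, ih]
      have hf : List.filter (fun q => q.1 == a) (l ++ [p]) = List.filter (fun q => q.1 == a) l := by
        simp [List.filter_append, Ne.symm hpa]
      simp [pvSel, hf]

-- keys of A's fold = first occurrences of the predecessors
lemma foldPair_keys (ps : List (String × String)) :
    (ps.foldl pvPairStep PySem.Dict.empty).keys =
      PySem.Set.ofList (ps.map (fun q => q.1)) := by
  have h := PySem.Dict.keys_foldl_insert_key (ν := PySem.Dict String Int) ps (fun q : String × String => q.1)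
    (fun w p => ((w.getD p.1 PySem.Dict.empty).insert p.2
      ((w.getD p.1 PySem.Dict.empty).getD p.2 0 + 1))) PySem.Dict.empty
  rw [PySem.Dict.keys_empty, PySem.Set.update_nil_left] at h
  rw [show pvPairStep = (fun (w : PySem.Dict String (PySem.Dict String Int)) (p : String × String) =>
    w.insert p.1 ((w.getD p.1 PySem.Dict.empty).insert p.2
      ((w.getD p.1 PySem.Dict.empty).getD p.2 0 + 1))) from rfl]
  exact h

lemma foldPair_nodup (ps : List (String × String)) :
    (ps.foldl pvPairStep PySem.Dict.empty).keys.Nodup := by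
  rw [show pvPairStep = (fun (w : PySem.Dict String (PySem.Dict String Int)) (p : String × String) =>
    w.insert p.1 ((w.getD p.1 PySem.Dict.empty).insert p.2
      ((w.getD p.1 PySem.Dict.empty).getD p.2 0 + 1))) from rfl]
  exact PySem.Dict.nodup_keys_foldl_insert_key (ν := PySem.Dict String Int) ps (fun q : String × String => q.1)
    (fun w p => ((w.getD p.1 PySem.Dict.empty).insert p.2
      ((w.getD p.1 PySem.Dict.empty).getD p.2 0 + 1))) PySem.Dict.empty
    (by simp [PySem.Dict.keys_empty])

-- B's grouping dict: keys, nodup, and values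
lemma groups_keys (ps : List (String × String)) :
    (ps.foldl pvGroupStep PySem.Dict.empty).keys =
      PySem.Set.ofList (ps.map (fun q => q.1)) := by
  have := PySem.Dict.keys_foldl_modify_key ps (fun q => q.1) []
    (fun _ p l => l ++ [p.2]) PySem.Dict.empty
  simpa [pvGroupStep, PySem.Dict.keys_empty, PySem.Set.update_nil_left] using this

lemma groups_nodup (ps : List (String × String)) :
    (ps.foldl pvGroupStep PySem.Dict.empty).keys.Nodup := by
  have := PySem.Dict.nodup_keys_foldl_modify_key ps (fun q => q.1) []
    (fun _ p l => l ++ [p.2]) PySem.Dict.empty (by simp [PySem.Dict.keys_empty])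
  simpa [pvGroupStep] using this

lemma groups_getD (ps : List (String × String)) (a : String) :
    (ps.foldl pvGroupStep PySem.Dict.empty).getD a [] = pvSel ps a := by
  have := PySem.Dict.getD_foldl_modify_append ps PySem.Dict.empty a
  simpa [pvGroupStep, pvSel, PySem.Dict.getD_empty] using this

-- the two result dicts have the same items list
lemma dicts_eq (ps : List (String × String)) :
    ps.foldl pvPairStep PySem.Dict.empty =
      ((ps.foldl pvGroupStep PySem.Dict.empty).items.foldl
        (fun w q => w.insert q.1 (pvCountList q.2)) PySem.Dict.empty) := by
  apply PySem.Dict.ext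
  set G := ps.foldl pvGroupStep PySem.Dict.empty with hG
  have hGitems : G.items = (PySem.Set.ofList (ps.map (fun q => q.1))).map
      (fun a => (a, pvSel ps a)) := by
    rw [PySem.Dict.items_eq_map_keys G (groups_nodup ps) []]
    rw [groups_keys ps]
    exact List.map_congr_left (fun a _ => by rw [groups_getD ps a])
  have hfresh : ∀ q ∈ G.items, (PySem.Dict.empty :
      PySem.Dict String (PySem.Dict String Int)).contains q.1 = false := by
    intro q _; simp [PySem.Dict.contains_empty]
  have hnodup : (G.items.map (fun q => q.1)).Nodup := groups_nodup ps
  rw [PySem.Dict.items_foldl_insert_fresh G.items (fun q => q.1)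
    (fun q => pvCountList q.2) PySem.Dict.empty hfresh hnodup]
  rw [PySem.Dict.items_eq_map_keys _ (foldPair_nodup ps) PySem.Dict.empty]
  rw [foldPair_keys ps, hGitems]
  rw [show (PySem.Dict.empty : PySem.Dict String (PySem.Dict String Int)).items = [] from rfl,
    List.nil_append, List.map_map]
  exact List.map_congr_left (fun a _ => by simp [Function.comp, foldPair_getD ps a])

-- ===== VERDICT (by name: the statement is the Claim_ definition above) =====
theorem get_word_weights_spec : Claim_equal_get_word_weights := by
  intro sentences _
  unfold Spec_get_word_weights get_word_weights get_word_weights_alt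
  rw [foldA_eq_pairs, dicts_eq]
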